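-- pv_equiv track=rewrite | github.com/Dylier/TercerLaboratorioDL | Aplicacion/metodoQuineMcCluskey.py | encontrar_diferencia_un_bit
-- ===== SOURCE A (Python) =====
-- from typing import List, Dict, Tuple
--
-- def encontrar_diferencia_un_bit(bin1: str, bin2: str) -> Tuple[bool, str]:
--     """Analiza si dos cadenas binarias difieren en exactamente un bit.
--
--     Esta es una función clave en el algoritmo de Quine-McCluskey. Determina si dos términos
--     pueden combinarse. Por ejemplo:
--     - '1101' y '1111' difieren en un bit (posición 2) -> returna (True, '11_1')
--     - '1101' y '1001' difieren en un bit (posición 1) -> returna (True, '1_01')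
--     - '1101' y '1010' difieren en más de un bit -> returna (False, '')
--
--     El guion bajo ('_') en el resultado indica la posición donde los términos difieren.
--
--     parametros:
--         bin1: Primera cadena binaria
--         bin2: Segunda cadena binaria
--
--     Devuelve:
--         Tupla donde el primer elemento es True si difieren en un bit, y el segundo
--         elemento es la cadena resultante con '_' en la posición de diferencia
--     """
--     if len(bin1) != len(bin2):
--         return False, ''
--
--     diferencias = 0
--     resultado = ''
--
--     for i, (b1, b2) in enumerate(zip(bin1, bin2)):
--         if b1 != b2:
--             diferencias += 1
--             resultado += '_'
--         else:
--             resultado += b1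
--
--         if diferencias > 1:
--             return False, ''
--
--     return diferencias == 1, resultado
-- ===== SOURCE B (Python) =====
-- from typing import Tuple
--
-- def encontrar_diferencia_un_bit(bin1: str, bin2: str) -> Tuple[bool, str]:
--     if len(bin1) != len(bin2):
--         return False, ''
--     diffs = [i for i, (a, b) in enumerate(zip(bin1, bin2)) if a != b]
--     if len(diffs) == 0:
--         return False, bin1
--     if len(diffs) == 1:
--         k = diffs[0]
--         return True, bin1[:k] + '_' + bin1[k + 1:]
--     return False, ''
-- ===== Notes on version B (the rewrite author's own statement) =====
-- stated objective: simpler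
-- what changed: Replaces A's interleaved build-while-counting loop with early exit by a single pass that collects the differing indices, then a three-way branch on how many there are, rebuilding the masked string by slicing only in the one-difference case.
import Mathlib
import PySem

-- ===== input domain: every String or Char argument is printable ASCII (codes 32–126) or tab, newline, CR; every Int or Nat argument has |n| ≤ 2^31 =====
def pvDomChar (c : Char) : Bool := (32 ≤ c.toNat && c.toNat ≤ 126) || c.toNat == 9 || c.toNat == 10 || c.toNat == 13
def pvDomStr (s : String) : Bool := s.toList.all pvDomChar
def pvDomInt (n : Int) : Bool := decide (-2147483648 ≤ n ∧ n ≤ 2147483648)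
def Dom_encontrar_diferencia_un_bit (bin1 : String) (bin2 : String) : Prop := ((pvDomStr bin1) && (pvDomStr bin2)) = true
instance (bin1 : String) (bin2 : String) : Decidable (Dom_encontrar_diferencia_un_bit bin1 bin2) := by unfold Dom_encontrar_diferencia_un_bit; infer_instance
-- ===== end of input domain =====

-- B replaces A's build-while-counting loop (with early exit) by collecting the differing
-- indices in one pass and branching on how many there are (objective: simpler).

-- ===== PORT A =====
-- the for-loop of A: state = (diferencias, resultado); the '> 1' early return is checked
-- after each element, exactly as in the Python body
def pvALoop : List (Char × Char) → Int → List Char → Bool × String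
  | [], dif, res => (dif == 1, String.ofList res)
  | (b1, b2) :: rest, dif, res =>
    if b1 ≠ b2 then
      let dif' := dif + 1
      let res' := res ++ ['_']
      if dif' > 1 then (false, "") else pvALoop rest dif' res'
    else
      let res' := res ++ [b1]
      if dif > 1 then (false, "") else pvALoop rest dif res'

def encontrar_diferencia_un_bit (bin1 : String) (bin2 : String) : Bool × String :=
  if bin1.toList.length ≠ bin2.toList.length then (false, "")
  else pvALoop (bin1.toList.zip bin2.toList) 0 []

-- ===== PORT B =====
-- [i for i, (a, b) in enumerate(zip(bin1, bin2)) if a != b]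
def pvDiffIdx (l1 l2 : List Char) : List Int :=
  ((PySem.List.enumerate (l1.zip l2) 0).filter (fun p => p.2.1 != p.2.2)).map Prod.fst

def encontrar_diferencia_un_bit_alt (bin1 : String) (bin2 : String) : Bool × String :=
  if bin1.toList.length ≠ bin2.toList.length then (false, "")
  else
    match pvDiffIdx bin1.toList bin2.toList with
    | [] => (false, bin1)
    | [k] => (true, String.ofList (PySem.List.slice bin1.toList none (some k) ++
                               '_' :: PySem.List.slice bin1.toList (some (k + 1)) none))
    | _ => (false, "")

-- ===== PRECONDITION & SPEC =====
def Spec_encontrar_diferencia_un_bit (bin1 : String) (bin2 : String) (out : Bool × String) : Prop := out = encontrar_diferencia_un_bit_alt bin1 bin2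
instance (bin1 : String) (bin2 : String) (out : Bool × String) : Decidable (Spec_encontrar_diferencia_un_bit bin1 bin2 out) := by unfold Spec_encontrar_diferencia_un_bit; infer_instance

-- ===== CLAIM (what is proved, stated in full; the proofs are below) =====
def Claim_equal_encontrar_diferencia_un_bit : Prop := ∀ (bin1 : String) (bin2 : String), Dom_encontrar_diferencia_un_bit bin1 bin2 → Spec_encontrar_diferencia_un_bit bin1 bin2 (encontrar_diferencia_un_bit bin1 bin2)

-- ===== LEMMAS AND PROOFS =====

-- mismatch positions as naturals, built structurally (proof-side characterisation of pvDiffIdx)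
def pvDnat : List (Char × Char) → List Nat
  | [] => []
  | (a, b) :: ps => if a ≠ b then 0 :: (pvDnat ps).map (· + 1) else (pvDnat ps).map (· + 1)

lemma pvDiffIdx_eq_dnat (ps : List (Char × Char)) :
    ∀ s : Int, ((PySem.List.enumerate ps s).filter (fun p => p.2.1 != p.2.2)).map Prod.fst
      = (pvDnat ps).map (fun n : Nat => (n : Int) + s) := by
  induction ps with
  | nil => intro s; simp [PySem.List.enumerate_nil, pvDnat]
  | cons p ps ih =>
    intro s
    obtain ⟨a, b⟩ := p
    rw [PySem.List.enumerate_cons, List.filter_cons]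
    by_cases h : a = b
    · simp [pvDnat, h, ih (s + 1), List.map_map]
      intro n _; ring
    · simp [pvDnat, h, ih (s + 1), List.map_map]
      intro n _; ring

lemma pvALoop_one (ps : List (Char × Char)) :
    ∀ res : List Char, pvALoop ps 1 res =
      if pvDnat ps = [] then (true, String.ofList (res ++ ps.map Prod.fst)) else (false, "") := by
  induction ps with
  | nil => intro res; simp [pvALoop, pvDnat]
  | cons p ps ih =>
    intro res
    obtain ⟨a, b⟩ := p
    by_cases h : a = b
    · rw [show pvALoop ((a, b) :: ps) 1 res = pvALoop ps 1 (res ++ [a]) by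
        simp [pvALoop, h]]
      rw [ih (res ++ [a])]
      rcases hd : pvDnat ps with _ | ⟨k, ks⟩ <;> simp [pvDnat, h, hd]
    · simp [pvALoop, h, pvDnat]

lemma pvALoop_zero (ps : List (Char × Char)) :
    ∀ res : List Char, pvALoop ps 0 res =
      match pvDnat ps with
      | [] => (false, String.ofList (res ++ ps.map Prod.fst))
      | [k] => (true, String.ofList (res ++ ((ps.map Prod.fst).take k ++
                 '_' :: (ps.map Prod.fst).drop (k + 1))))
      | _ => (false, "") := by
  induction ps with
  | nil => intro res; simp [pvALoop, pvDnat]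
  | cons p ps ih =>
    intro res
    obtain ⟨a, b⟩ := p
    by_cases h : a = b
    · rw [show pvALoop ((a, b) :: ps) 0 res = pvALoop ps 0 (res ++ [a]) by
        simp [pvALoop, h]]
      rw [ih (res ++ [a])]
      rcases hd : pvDnat ps with _ | ⟨k, _ | ⟨k2, ks⟩⟩ <;> simp [pvDnat, h, hd]
    · rw [show pvALoop ((a, b) :: ps) 0 res = pvALoop ps 1 (res ++ ['_']) by
        simp [pvALoop, h]]
      rw [pvALoop_one]
      rcases hd : pvDnat ps with _ | ⟨k, ks⟩ <;> simp [pvDnat, h, hd]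

-- ===== VERDICT (by name: the statement is the Claim_ definition above) =====
theorem encontrar_diferencia_un_bit_spec : Claim_equal_encontrar_diferencia_un_bit := by
  intro bin1 bin2 _
  unfold Spec_encontrar_diferencia_un_bit encontrar_diferencia_un_bit encontrar_diferencia_un_bit_alt
  by_cases hlen : bin1.toList.length = bin2.toList.length
  · rw [if_neg (not_not_intro hlen), if_neg (not_not_intro hlen)]
    have hfst : (bin1.toList.zip bin2.toList).map Prod.fst = bin1.toList :=
      List.map_fst_zip (le_of_eq hlen)
    rw [pvALoop_zero]
    unfold pvDiffIdx
    rw [pvDiffIdx_eq_dnat]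
    rcases hd : pvDnat (bin1.toList.zip bin2.toList) with _ | ⟨k, _ | ⟨k2, ks⟩⟩
    · simp [hfst, String.ofList_toList]
    · simp only [List.map_cons, List.map_nil]
      have h1 : ((k : Int) + 0) = (k : Int) := by ring
      have h2 : ((k : Int) + 1) = ((k + 1 : Nat) : Int) := by push_cast; ring
      simp only [h1]
      rw [h2, PySem.List.slice_to_natCast, PySem.List.slice_from_natCast, hfst]
      simp
    · simp
  · rw [if_pos hlen, if_pos hlen]
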